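-- pv_equiv track=rewrite | github.com/Felix-hans/GenerativeBenchmarking | data/problems/1665/result/1665.output_5.py | minimumEffort
-- ===== SOURCE A (Python) =====
-- from typing import List
--
-- def minimumEffort(tasks: List[List[int]]) -> int:
--     tasks.sort(key=lambda x: x[1] - x[0], reverse=True)
--     total_energy = 0
--     initial_energy = 0
--
--     for actual, minimum in tasks:
--         if initial_energy < minimum:
--             diff = minimum - initial_energy
--             total_energy += diff
--             initial_energy += diff
--         initial_energy -= actual
--
--     return total_energy
-- ===== SOURCE B (Python) =====
-- def minimumEffort(tasks):
--     tasks.sort(key=lambda x: x[1] - x[0], reverse=True)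
--     if not tasks:
--         return 0
--     # backward pass: req = energy needed to start the remaining suffix of tasks
--     req = tasks[-1][1]
--     for actual, minimum in reversed(tasks[:-1]):
--         req = max(minimum, actual + req)
--     return max(req, 0)
-- ===== Notes on version B (the rewrite author's own statement) =====
-- stated objective: alternative
-- what changed: Replaces A's forward simulation of a running energy level with conditional top-ups by a backward suffix recurrence: starting from the last task's minimum, req = max(minimum, actual + req) walking the sorted list from the back, so the maintained quantity is the energy needed ahead rather than the energy spent so far.
import Mathlib
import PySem

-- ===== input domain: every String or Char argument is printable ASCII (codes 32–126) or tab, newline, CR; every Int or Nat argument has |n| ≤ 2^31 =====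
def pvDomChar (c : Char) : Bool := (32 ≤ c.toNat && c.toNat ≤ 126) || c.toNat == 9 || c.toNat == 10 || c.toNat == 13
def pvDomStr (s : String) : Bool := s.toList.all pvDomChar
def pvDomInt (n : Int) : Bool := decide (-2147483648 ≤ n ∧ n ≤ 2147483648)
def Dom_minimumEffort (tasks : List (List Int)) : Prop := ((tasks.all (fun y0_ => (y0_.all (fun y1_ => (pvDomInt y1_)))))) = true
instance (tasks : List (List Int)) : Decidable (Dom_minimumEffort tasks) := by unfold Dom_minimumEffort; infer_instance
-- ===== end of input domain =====

-- B replaces A's forward simulation (running energy level with conditional top-up)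
-- by a backward suffix recurrence req = max(minimum, actual + req) (objective:
-- alternative). Both sort the input list in place; the equivalence proved here is
-- about the return value (B performs the same in-place sort).

-- ===== PORT A =====
-- loop body of A: state (total_energy, initial_energy); the fall-through arm is
-- unreachable under Pre_ (Python raises on inner lists of length ≠ 2)
def pvStepA (st : Int × Int) (t : List Int) : Int × Int :=
  match t with
  | [actual, minimum] =>
      if st.2 < minimum then
        (st.1 + (minimum - st.2), st.2 + (minimum - st.2) - actual)
      else (st.1, st.2 - actual)
  | _ => st

def minimumEffort (tasks : List (List Int)) : Int :=
  let s := PySem.List.sorted tasks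
    (fun x => (PySem.List.pyGet? x 1).getD 0 - (PySem.List.pyGet? x 0).getD 0) true
  (s.foldl pvStepA (0, 0)).1

-- ===== PORT B =====
-- loop body of B: ``req = max(minimum, actual + req)``; the fall-through arm is
-- unreachable under Pre_
def pvStepBack (req : Int) (t : List Int) : Int :=
  match t with
  | [actual, minimum] => max minimum (actual + req)
  | _ => req

def minimumEffort_alt (tasks : List (List Int)) : Int :=
  let s := PySem.List.sorted tasks
    (fun x => (PySem.List.pyGet? x 1).getD 0 - (PySem.List.pyGet? x 0).getD 0) true
  if s = [] then 0
  else
    -- req = tasks[-1][1]; for actual, minimum in reversed(tasks[:-1]):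
    --   req = max(minimum, actual + req);  return max(req, 0)
    max (((PySem.List.slice s none (some (-1))).reverse).foldl pvStepBack
      ((PySem.List.pyGet? ((PySem.List.pyGet? s (-1)).getD []) 1).getD 0)) 0

-- ===== PRECONDITION & SPEC =====
-- Python A raises (IndexError in the sort key, or unpacking ValueError) unless
-- every inner list has exactly two elements.
def Pre_minimumEffort (tasks : List (List Int)) : Prop :=
  ∀ l ∈ tasks, l.length = 2
instance (tasks : List (List Int)) : Decidable (Pre_minimumEffort tasks) := by
  unfold Pre_minimumEffort; infer_instance

def pvWitness_minimumEffort : List (List Int) := [[4, 10], [2, 3], [1, 7]]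

def Spec_minimumEffort (tasks : List (List Int)) (out : Int) : Prop := out = minimumEffort_alt tasks
instance (tasks : List (List Int)) (out : Int) : Decidable (Spec_minimumEffort tasks out) := by unfold Spec_minimumEffort; infer_instance

-- ===== CLAIM (what is proved, stated in full; the proofs are below) =====
def Claim_equal_minimumEffort : Prop := ∀ (tasks : List (List Int)), Dom_minimumEffort tasks → Pre_minimumEffort tasks → Spec_minimumEffort tasks (minimumEffort tasks)

-- ===== LEMMAS AND PROOFS =====

-- Proof-only intermediate form: the branch-free prefix-max scan, used to bridge
-- A's forward simulation and B's backward recurrence.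
def pvStepB (st : Int × Int) (t : List Int) : Int × Int :=
  match t with
  | [actual, minimum] => (st.1 + actual, max st.2 (st.1 + minimum))
  | _ => st

-- Proof-only closed form of B's backward recurrence on a nonempty list.
def pvBack : List (List Int) → Int
  | [] => 0
  | [t] => match t with | [_, m] => m | _ => 0
  | t :: u :: rest => pvStepBack (pvBack (u :: rest)) t

-- Invariant linking A's state (total, energy) to the prefix-max state (cur, ans):
-- total = ans and energy = ans - cur.
theorem pv_loop_rel (s : List (List Int)) (h : ∀ l ∈ s, l.length = 2) (cur ans : Int) :
    (s.foldl pvStepA (ans, ans - cur)).1 = (s.foldl pvStepB (cur, ans)).2 := by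
  induction s generalizing cur ans with
  | nil => rfl
  | cons l t ih =>
    obtain ⟨a, m, rfl⟩ : ∃ a m, l = [a, m] := by
      have hl := h l (List.mem_cons_self)
      match l with
      | [a, m] => exact ⟨a, m, rfl⟩
    have ht : ∀ l ∈ t, l.length = 2 := fun l hl => h l (List.mem_cons_of_mem _ hl)
    simp only [List.foldl_cons, pvStepA, pvStepB]
    by_cases hc : ans - cur < m
    · rw [if_pos hc]
      have e1 : ((ans : Int) + (m - (ans - cur)), ans - cur + (m - (ans - cur)) - a)
          = (cur + m, cur + m - (cur + a)) := by
        simp only [Prod.mk.injEq]; omega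
      have e2 : ((cur : Int) + a, max ans (cur + m)) = (cur + a, cur + m) := by
        rw [max_eq_right (by omega : ans ≤ cur + m)]
      rw [e1, e2]
      exact ih ht (cur + a) (cur + m)
    · rw [if_neg hc]
      have e1 : ((ans : Int), ans - cur - a) = (ans, ans - (cur + a)) := by
        simp only [Prod.mk.injEq, true_and]; omega
      have e2 : ((cur : Int) + a, max ans (cur + m)) = (cur + a, ans) := by
        rw [max_eq_left (by omega : cur + m ≤ ans)]
      rw [e1, e2]
      exact ih ht (cur + a) ans

-- The prefix-max scan over a nonempty list computes max ans (cur + pvBack s).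
theorem pv_prefix_eq_back (s : List (List Int)) (h : ∀ l ∈ s, l.length = 2)
    (hne : s ≠ []) (cur ans : Int) :
    (s.foldl pvStepB (cur, ans)).2 = max ans (cur + pvBack s) := by
  induction s generalizing cur ans with
  | nil => exact absurd rfl hne
  | cons l t ih =>
    obtain ⟨a, m, rfl⟩ : ∃ a m, l = [a, m] := by
      have hl := h l (List.mem_cons_self)
      match l with
      | [a, m] => exact ⟨a, m, rfl⟩
    have ht : ∀ l ∈ t, l.length = 2 := fun l hl => h l (List.mem_cons_of_mem _ hl)
    cases t with
    | nil => simp [pvStepB, pvBack]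
    | cons u rest =>
      rw [List.foldl_cons,
        show pvStepB (cur, ans) [a, m] = (cur + a, max ans (cur + m)) from rfl,
        ih ht (List.cons_ne_nil u rest),
        show pvBack ([a, m] :: u :: rest) = max m (a + pvBack (u :: rest)) from rfl]
      omega

-- B's port loop (reverse + foldl over the init, seeded with the last minimum)
-- computes pvBack on a nonempty list of pairs.
theorem pv_port_loop_eq_back (s : List (List Int)) (h : ∀ l ∈ s, l.length = 2)
    (hne : s ≠ []) :
    ((PySem.List.slice s none (some (-1))).reverse).foldl pvStepBack
      ((PySem.List.pyGet? ((PySem.List.pyGet? s (-1)).getD []) 1).getD 0)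
    = pvBack s := by
  rw [PySem.List.slice_to_neg_one, PySem.List.pyGet?_neg_one, List.foldl_reverse]
  induction s with
  | nil => exact absurd rfl hne
  | cons l t ih =>
    cases t with
    | nil =>
      obtain ⟨a, m, rfl⟩ : ∃ a m, l = [a, m] := by
        have hl := h l (List.mem_cons_self)
        match l with
        | [a, m] => exact ⟨a, m, rfl⟩
      simp [pvBack, PySem.List.pyGet?, PySem.List.pyIdx?]
    | cons u rest =>
      have ht : ∀ l ∈ u :: rest, l.length = 2 :=
        fun l hl => h l (List.mem_cons_of_mem _ hl)
      have := ih ht (List.cons_ne_nil u rest)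
      simp only [List.getLast?_cons_cons] at this ⊢
      rw [List.dropLast_cons_of_ne_nil (List.cons_ne_nil u rest)]
      simp only [List.foldr_cons, this, pvBack]

-- ===== VERDICT (by name: the statement is the Claim_ definition above) =====
theorem minimumEffort_spec : Claim_equal_minimumEffort := by
  intro tasks _ hpre
  unfold Spec_minimumEffort minimumEffort minimumEffort_alt
  set s := PySem.List.sorted tasks
    (fun x => (PySem.List.pyGet? x 1).getD 0 - (PySem.List.pyGet? x 0).getD 0) true with hsdef
  have hs : ∀ l ∈ s, l.length = 2 := by
    intro l hl
    exact hpre l ((PySem.List.mem_sorted _ _ _ _).mp hl)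
  by_cases hne : s = []
  · simp [hne]
  · rw [if_neg hne]
    have h1 := pv_loop_rel s hs 0 0
    norm_num at h1
    rw [h1, pv_prefix_eq_back s hs hne 0 0, pv_port_loop_eq_back s hs hne, zero_add,
      max_comm]
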